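-- pv_equiv track=rewrite | github.com/SquirtlesAlgorithmStudy/SquirtlesAlgorithmStudy-Hard | 민서/홀짝트리.py | solution
-- ===== SOURCE A (Python) =====
-- def solution(nodes, edges):
--     answer = [0, 0]
--     N = len(nodes)
--     node2i = {n: i for i, n in enumerate(nodes)}
--     graph = [[] for _ in range(N)]
--     for a, b in edges:
--         graph[node2i[a]].append(node2i[b])
--         graph[node2i[b]].append(node2i[a])
--     total = []
--     cnt = []
--     visited = [False] * N
--     def dfs(n):
--         visited[n] = True
--         total[-1] += 1
--         if nodes[n] % 2 == len(graph[n]) % 2: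
--             cnt[-1] += 1
--         for c in graph[n]:
--             if not visited[c]:
--                 dfs(c)
--     for i in range(N):
--         if visited[i]:
--             continue
--         total.append(0)
--         cnt.append(0)
--         dfs(i)
--     for i in range(len(total)):
--         if cnt[i] == 1:
--             answer[0] += 1
--         if total[i] - cnt[i] == 1:
--             answer[1] += 1
--     return answer
-- ===== SOURCE B (Python) =====
-- def solution(nodes, edges):
--     n = len(nodes)
--     idx = {v: i for i, v in enumerate(nodes)}
--     adj = [[] for _ in range(n)]
--     for a, b in edges:
--         adj[idx[a]].append(idx[b])
--         adj[idx[b]].append(idx[a])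
--     seen = [False] * n
--     even_one = 0
--     odd_one = 0
--     for start in range(n):
--         if seen[start]:
--             continue
--         total = 0
--         match = 0
--         stack = [start]
--         while stack:
--             u = stack.pop()
--             if seen[u]:
--                 continue
--             seen[u] = True
--             total += 1
--             if nodes[u] % 2 == len(adj[u]) % 2:
--                 match += 1
--             for w in reversed(adj[u]):
--                 stack.append(w)
--         if match == 1:
--             even_one += 1
--         if total - match == 1:
--             odd_one += 1
--     return [even_one, odd_one]
-- ===== Notes on version B (the rewrite author's own statement) =====
-- stated objective: alternative
-- what changed: The recursive dfs with shared per-component list accumulators is replaced by an explicit-stack iterative traversal with scalar counters, and the trailing pass over the total/cnt lists is merged into the component loop; Pre_ excludes edges mentioning values absent from nodes, on which A raises KeyError (B raises too).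
import Mathlib
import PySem

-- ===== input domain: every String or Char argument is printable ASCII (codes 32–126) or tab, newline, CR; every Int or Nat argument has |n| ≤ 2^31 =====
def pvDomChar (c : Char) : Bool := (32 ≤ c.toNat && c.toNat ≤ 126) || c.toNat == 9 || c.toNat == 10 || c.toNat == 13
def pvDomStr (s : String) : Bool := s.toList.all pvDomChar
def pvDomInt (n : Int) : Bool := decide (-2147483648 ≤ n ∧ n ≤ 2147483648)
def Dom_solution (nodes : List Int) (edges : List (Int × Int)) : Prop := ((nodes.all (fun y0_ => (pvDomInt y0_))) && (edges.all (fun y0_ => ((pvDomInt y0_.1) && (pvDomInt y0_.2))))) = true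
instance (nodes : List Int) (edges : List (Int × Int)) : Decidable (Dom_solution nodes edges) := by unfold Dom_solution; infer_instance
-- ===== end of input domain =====

-- B replaces the recursive dfs by an explicit-stack traversal and folds the trailing
-- counting pass into the component loop; graph construction is the same in both Pythons,
-- so the construction helpers below are shared by the two ports.

-- ===== PORT A =====
-- shared helpers: `node2i = {n: i for i, n in enumerate(nodes)}` (same line in both Pythons)
def pvIdx (nodes : List Int) : PySem.Dict Int Int :=
  (PySem.List.enumerate nodes).foldl (fun d p => d.insert p.2 p.1) PySem.Dict.empty

-- `graph[i].append(j)` (indices produced by node2i are nonnegative, so .toNat at the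
-- call sites below is exact; a missing key is a Python KeyError, excluded by Pre_,
-- and getD 0 is the total stand-in there)
def pvAddEdge (g : List (List Nat)) (i j : Nat) : List (List Nat) :=
  g.set i (g.getD i [] ++ [j])

-- the adjacency-building loop `for a, b in edges: ...` (identical in both Pythons)
def pvGraph (nodes : List Int) (edges : List (Int × Int)) : List (List Nat) :=
  let d := pvIdx nodes
  edges.foldl
    (fun g e =>
      pvAddEdge (pvAddEdge g ((d.getD e.1 0).toNat) ((d.getD e.2 0).toNat))
        ((d.getD e.2 0).toNat) ((d.getD e.1 0).toNat))
    (List.replicate nodes.length [])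

-- `nodes[n] % 2 == len(graph[n]) % 2` (same test in both Pythons; n < N at every use)
def pvMatch (nodes : List Int) (g : List (List Nat)) (n : Nat) : Bool :=
  PySem.Int.mod (nodes.getD n 0) 2 == PySem.Int.mod ((g.getD n []).length : Int) 2

-- state (visited, total-of-current-component, cnt-of-current-component);
-- the body `visited[n] = True; total[-1] += 1; if ...: cnt[-1] += 1`
def pvVisit (nodes : List Int) (g : List (List Nat)) (n : Nat)
    (s : List Bool × Int × Int) : List Bool × Int × Int :=
  (s.1.set n true, s.2.1 + 1, if pvMatch nodes g n then s.2.2 + 1 else s.2.2)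

-- A's recursive dfs; fuel only makes the recursion total (the top-level call passes
-- N = len(nodes), which the proofs show is never exhausted)
def dfsA (nodes : List Int) (g : List (List Nat)) :
    Nat → (List Bool × Int × Int) → Nat → List Bool × Int × Int
  | 0, s, _ => s
  | f + 1, s, n =>
      (g.getD n []).foldl
        (fun st c => if st.1.getD c false then st else dfsA nodes g f st c)
        (pvVisit nodes g n s)

def solution (nodes : List Int) (edges : List (Int × Int)) : List Int :=
  let N := nodes.length
  let g := pvGraph nodes edges
  -- `for i in range(N): if visited[i]: continue; total.append(0); cnt.append(0); dfs(i)`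
  let fin := (List.range N).foldl
    (fun (p : List Bool × List (Int × Int)) i =>
      if p.1.getD i false then p
      else
        let r := dfsA nodes g N (p.1, 0, 0) i
        (r.1, p.2 ++ [(r.2.1, r.2.2)]))
    (List.replicate N false, [])
  -- the trailing pass `for i in range(len(total)): ...`
  let ans := fin.2.foldl
    (fun (a : Int × Int) tc =>
      (if tc.2 = 1 then a.1 + 1 else a.1, if tc.1 - tc.2 = 1 then a.2 + 1 else a.2))
    (0, 0)
  [ans.1, ans.2]

-- ===== PORT B =====
-- termination helper for loopB (cited in decreasing_by): marking a fresh node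
-- strictly decreases the number of False entries
theorem pvCountFalse_set_lt (v : List Bool) (n : Nat) (h1 : n < v.length)
    (h2 : v.getD n false = false) : (v.set n true).count false < v.count false := by
  induction v generalizing n with
  | nil => simp at h1
  | cons b t ih =>
    cases n with
    | zero =>
      have hb : b = false := by simpa [List.getD] using h2
      simp [List.set, hb]
    | succ m =>
      have h1' : m < t.length := by simpa using h1
      have h2' : t.getD m false = false := by simpa [List.getD] using h2
      have := ih m h1' h2'
      simp only [List.set, List.count_cons]
      cases b <;> simp <;> omega

-- B's `while stack:` loop; state (seen, total, match), head of the list = top of stack.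
-- Python pushes reversed(adj[u]) and pops from the end, i.e. prepends adj[u] here.
-- The n < length conjunct only makes the loop total (stack entries are always < N).
def loopB (nodes : List Int) (g : List (List Nat)) :
    (List Bool × Int × Int) → List Nat → List Bool × Int × Int
  | s, [] => s
  | s, n :: rest =>
      if h : n < s.1.length ∧ s.1.getD n false = false then
        loopB nodes g (pvVisit nodes g n s) (g.getD n [] ++ rest)
      else loopB nodes g s rest
  termination_by s stack => (s.1.count false, stack.length)
  decreasing_by
  · exact Prod.Lex.left _ _ (by
      simpa [pvVisit] using pvCountFalse_set_lt s.1 n h.1 h.2)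
  · exact Prod.Lex.right _ (by simp)

def solution_alt (nodes : List Int) (edges : List (Int × Int)) : List Int :=
  let N := nodes.length
  let g := pvGraph nodes edges
  let fin := (List.range N).foldl
    (fun (p : List Bool × Int × Int) i =>
      if p.1.getD i false then p
      else
        let r := loopB nodes g (p.1, 0, 0) [i]
        (r.1, (if r.2.2 = 1 then p.2.1 + 1 else p.2.1),
          (if r.2.1 - r.2.2 = 1 then p.2.2 + 1 else p.2.2)))
    (List.replicate N false, 0, 0)
  [fin.2.1, fin.2.2]

-- ===== PRECONDITION & SPEC =====
-- Pre_ excludes exactly the inputs on which A raises KeyError: an edge endpoint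
-- that does not occur in nodes (B raises there too).
def Pre_solution (nodes : List Int) (edges : List (Int × Int)) : Prop :=
  (edges.all (fun e => nodes.contains e.1 && nodes.contains e.2)) = true
instance (nodes : List Int) (edges : List (Int × Int)) : Decidable (Pre_solution nodes edges) := by
  unfold Pre_solution; infer_instance

def pvWitness_solution : List Int × (List (Int × Int)) := ([1, 2, 4], [(1, 2)])

def Spec_solution (nodes : List Int) (edges : List (Int × Int)) (out : List Int) : Prop := out = solution_alt nodes edges
instance (nodes : List Int) (edges : List (Int × Int)) (out : List Int) : Decidable (Spec_solution nodes edges out) := by unfold Spec_solution; infer_instance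

-- ===== CLAIM (what is proved, stated in full; the proofs are below) =====
def Claim_equal_solution : Prop := ∀ (nodes : List Int) (edges : List (Int × Int)), Dom_solution nodes edges → Pre_solution nodes edges → Spec_solution nodes edges (solution nodes edges)

-- ===== LEMMAS AND PROOFS =====

-- the guarded recursive call `if not visited[c]: dfs(c)` as a step function
def runA (nodes : List Int) (g : List (List Nat)) (f : Nat)
    (st : List Bool × Int × Int) (c : Nat) : List Bool × Int × Int :=
  if st.1.getD c false then st else dfsA nodes g f st c

-- all adjacency entries are in range
def GOK (g : List (List Nat)) (N : Nat) : Prop := ∀ l ∈ g, ∀ c ∈ l, c < N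

theorem dfsA_succ (nodes : List Int) (g : List (List Nat)) (f : Nat)
    (s : List Bool × Int × Int) (n : Nat) :
    dfsA nodes g (f + 1) s n = (g.getD n []).foldl (runA nodes g f) (pvVisit nodes g n s) := by
  rfl

theorem pvFoldlPres {α β : Type} (P : β → Prop) (f : β → α → β) :
    ∀ (l : List α) (b : β), P b → (∀ x ∈ l, ∀ st, P st → P (f st x)) → P (l.foldl f b) := by
  intro l
  induction l with
  | nil => intro b hb _; exact hb
  | cons x xs ih =>
    intro b hb hstep
    exact ih (f b x) (hstep x List.mem_cons_self b hb)
      (fun y hy st hst => hstep y (List.mem_cons_of_mem _ hy) st hst)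

theorem pvIdx_aux (B : Int) : ∀ (l : List Int) (s : Int) (d : PySem.Dict Int Int),
    0 ≤ s → s + l.length ≤ B → (∀ k, 0 ≤ d.getD k 0 ∧ d.getD k 0 < B) →
    ∀ k, 0 ≤ ((PySem.List.enumerate l s).foldl (fun d p => d.insert p.2 p.1) d).getD k 0 ∧
      ((PySem.List.enumerate l s).foldl (fun d p => d.insert p.2 p.1) d).getD k 0 < B := by
  intro l
  induction l with
  | nil => intro s d _ _ hd k; simpa [PySem.List.enumerate] using hd k
  | cons x xs ih =>
    intro s d hs hB hd k
    rw [PySem.List.enumerate_cons]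
    simp only [List.foldl_cons]
    refine ih (s + 1) _ (by omega) (by simp at hB ⊢; omega) ?_ k
    intro k'
    rw [PySem.Dict.getD_insert]
    split
    · refine ⟨hs, ?_⟩
      simp only [List.length_cons] at hB
      push_cast at hB
      omega
    · exact hd k'

theorem pvIdx_getD_lt (nodes : List Int) (h : 0 < nodes.length) (k : Int) :
    0 ≤ (pvIdx nodes).getD k 0 ∧ (pvIdx nodes).getD k 0 < (nodes.length : Int) := by
  refine pvIdx_aux (nodes.length : Int) nodes 0 PySem.Dict.empty (le_refl 0) (by simp) ?_ k
  intro k'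
  simp [PySem.Dict.getD_empty]
  exact_mod_cast h

theorem pvGetD_mem_or_nil (g : List (List Nat)) (i : Nat) :
    g.getD i [] ∈ g ∨ g.getD i [] = [] := by
  by_cases h : i < g.length
  · left
    rw [List.getD_eq_getElem?_getD, List.getElem?_eq_getElem h]
    exact List.getElem_mem h
  · right
    rw [List.getD_eq_getElem?_getD, List.getElem?_eq_none (by omega)]
    rfl

theorem pvAddEdge_gok (g : List (List Nat)) (N i j : Nat) (hg : GOK g N) (hj : j < N) :
    GOK (pvAddEdge g i j) N := by
  intro l hl c hc
  rcases List.mem_or_eq_of_mem_set hl with h | h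
  · exact hg l h c hc
  · subst h
    rcases List.mem_append.mp hc with h | h
    · rcases pvGetD_mem_or_nil g i with hm | hm
      · exact hg _ hm c h
      · rw [hm] at h; simp at h
    · simp at h; omega

theorem pvGraph_gok (nodes : List Int) (edges : List (Int × Int)) :
    GOK (pvGraph nodes edges) nodes.length := by
  by_cases hN : nodes.length = 0
  · have hnil : pvGraph nodes edges = [] := by
      unfold pvGraph
      have hrep : List.replicate nodes.length ([] : List Nat) = [] := by simp [hN]
      rw [hrep]
      refine pvFoldlPres (fun g => g = []) _ edges ([] : List (List Nat)) rfl ?_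
      intro e _ st hst
      rw [hst]
      rfl
    rw [hnil]
    intro l hl
    simp at hl
  · have hpos : 0 < nodes.length := Nat.pos_of_ne_zero hN
    have hbound : ∀ (k : Int), ((pvIdx nodes).getD k 0).toNat < nodes.length := by
      intro k
      obtain ⟨h0, h1⟩ := pvIdx_getD_lt nodes hpos k
      omega
    unfold pvGraph
    refine pvFoldlPres (fun g => GOK g nodes.length) _ edges _ ?_ ?_
    · intro l hl c hc
      rw [List.eq_of_mem_replicate hl] at hc
      simp at hc
    · intro e _ st hst
      exact pvAddEdge_gok _ _ _ _ (pvAddEdge_gok _ _ _ _ hst (hbound e.2)) (hbound e.1)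

theorem pvCount_set_true_le (v : List Bool) (n : Nat) :
    (v.set n true).count false ≤ v.count false := by
  induction v generalizing n with
  | nil => simp
  | cons b t ih =>
    cases n with
    | zero => cases b <;> simp [List.set]
    | succ m =>
      have := ih m
      simp only [List.set, List.count_cons]
      cases b <;> simp <;> omega

theorem pvVisit_len (nodes : List Int) (g : List (List Nat)) (n : Nat)
    (s : List Bool × Int × Int) : (pvVisit nodes g n s).1.length = s.1.length := by
  simp [pvVisit]

theorem pvVisit_count_le (nodes : List Int) (g : List (List Nat)) (n : Nat)
    (s : List Bool × Int × Int) :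
    (pvVisit nodes g n s).1.count false ≤ s.1.count false :=
  pvCount_set_true_le s.1 n

theorem pvVisit_count_lt (nodes : List Int) (g : List (List Nat)) (n : Nat)
    (s : List Bool × Int × Int) (h1 : n < s.1.length) (h2 : s.1.getD n false = false) :
    (pvVisit nodes g n s).1.count false < s.1.count false :=
  pvCountFalse_set_lt s.1 n h1 h2

theorem dfsA_inv (nodes : List Int) (g : List (List Nat)) :
    ∀ (f : Nat) (s : List Bool × Int × Int) (n : Nat),
      (dfsA nodes g f s n).1.length = s.1.length ∧
      (dfsA nodes g f s n).1.count false ≤ s.1.count false := by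
  intro f
  induction f with
  | zero => intro s n; exact ⟨rfl, le_refl _⟩
  | succ f ih =>
    intro s n
    rw [dfsA_succ]
    refine pvFoldlPres
      (fun (st : List Bool × Int × Int) => st.1.length = s.1.length ∧ st.1.count false ≤ s.1.count false) _ _ _
      ⟨pvVisit_len nodes g n s, pvVisit_count_le nodes g n s⟩ ?_
    intro c _ st hst
    unfold runA
    split
    · exact hst
    · obtain ⟨h1, h2⟩ := ih st c
      exact ⟨h1.trans hst.1, h2.trans hst.2⟩

theorem foldl_runA_inv (nodes : List Int) (g : List (List Nat)) (f : Nat)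
    (s : List Bool × Int × Int) (cs : List Nat) :
    (cs.foldl (runA nodes g f) s).1.length = s.1.length ∧
    (cs.foldl (runA nodes g f) s).1.count false ≤ s.1.count false := by
  refine pvFoldlPres
    (fun (st : List Bool × Int × Int) => st.1.length = s.1.length ∧ st.1.count false ≤ s.1.count false) _ _ _
    ⟨rfl, le_refl _⟩ ?_
  intro c _ st hst
  unfold runA
  split
  · exact hst
  · obtain ⟨h1, h2⟩ := dfsA_inv nodes g f st c
    exact ⟨h1.trans hst.1, h2.trans hst.2⟩

theorem pvCount_pos (v : List Bool) (c : Nat) (hc : c < v.length)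
    (hv : v.getD c false = false) : 0 < v.count false := by
  rw [List.count_pos_iff]
  rw [List.getD_eq_getElem?_getD, List.getElem?_eq_getElem hc] at hv
  simp at hv
  rw [← hv]
  exact List.getElem_mem hc

theorem FIF (nodes : List Int) (g : List (List Nat)) (N : Nat) (hg : GOK g N) :
    ∀ u : Nat, ∀ (s : List Bool × Int × Int) (cs : List Nat) (f f' : Nat),
      s.1.length = N → s.1.count false ≤ u → u ≤ f → u ≤ f' → (∀ c ∈ cs, c < N) →
      List.foldl (runA nodes g f) s cs = List.foldl (runA nodes g f') s cs := by
  intro u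
  induction u using Nat.strong_induction_on with
  | _ u IHu =>
    intro s cs
    induction cs generalizing s with
    | nil => intros; rfl
    | cons c cs' ihcs =>
      intro f f' hL hcu huf huf' hcs
      cases hvb : s.1.getD c false with
      | true =>
        simp only [List.foldl_cons]
        rw [show runA nodes g f s c = s by unfold runA; rw [if_pos hvb],
          show runA nodes g f' s c = s by unfold runA; rw [if_pos hvb]]
        exact ihcs s f f' hL hcu huf huf' (fun x hx => hcs x (List.mem_cons_of_mem _ hx))
      | false =>
        have hcN : c < N := hcs c List.mem_cons_self
        have hclen : c < s.1.length := by omega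
        have hpos : 0 < s.1.count false := pvCount_pos s.1 c hclen hvb
        have hu1 : 1 ≤ u := le_trans hpos hcu
        obtain ⟨f0, rfl⟩ : ∃ f0, f = f0 + 1 := ⟨f - 1, by omega⟩
        obtain ⟨f0', rfl⟩ : ∃ f0', f' = f0' + 1 := ⟨f' - 1, by omega⟩
        have hadj : ∀ x ∈ g.getD c [], x < N := by
          rcases pvGetD_mem_or_nil g c with hm | hm
          · exact hg _ hm
          · rw [hm]; intro x hx; simp at hx
        have hL1 : (pvVisit nodes g c s).1.length = N := by rw [pvVisit_len]; exact hL
        have hc1 : (pvVisit nodes g c s).1.count false ≤ u - 1 := by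
          have := pvVisit_count_lt nodes g c s hclen hvb
          omega
        have hheads : dfsA nodes g (f0 + 1) s c = dfsA nodes g (f0' + 1) s c := by
          rw [dfsA_succ, dfsA_succ]
          exact IHu (u - 1) (by omega) _ _ f0 f0' hL1 hc1 (by omega) (by omega) hadj
        simp only [List.foldl_cons]
        rw [show runA nodes g (f0 + 1) s c = dfsA nodes g (f0 + 1) s c by
            unfold runA; rw [if_neg (by rw [hvb]; simp)],
          show runA nodes g (f0' + 1) s c = dfsA nodes g (f0' + 1) s c by
            unfold runA; rw [if_neg (by rw [hvb]; simp)],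
          ← hheads]
        have hs2c : (dfsA nodes g (f0 + 1) s c).1.count false ≤ u - 1 := by
          rw [dfsA_succ]
          have := (foldl_runA_inv nodes g f0 (pvVisit nodes g c s) (g.getD c [])).2
          omega
        have hs2L : (dfsA nodes g (f0 + 1) s c).1.length = N := by
          rw [dfsA_succ, (foldl_runA_inv nodes g f0 _ _).1]
          exact hL1
        exact IHu (u - 1) (by omega) _ cs' (f0 + 1) (f0' + 1) hs2L hs2c (by omega) (by omega)
          (fun x hx => hcs x (List.mem_cons_of_mem _ hx))

theorem ML (nodes : List Int) (g : List (List Nat)) (N : Nat) (hg : GOK g N) :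
    ∀ u : Nat, ∀ (s : List Bool × Int × Int) (stack : List Nat) (f : Nat),
      s.1.length = N → s.1.count false ≤ u → u ≤ f → (∀ c ∈ stack, c < N) →
      loopB nodes g s stack = List.foldl (runA nodes g f) s stack := by
  intro u
  induction u using Nat.strong_induction_on with
  | _ u IHu =>
    intro s stack
    induction stack generalizing s with
    | nil => intros; rw [loopB]; rfl
    | cons n rest ihst =>
      intro f hL hcu huf hstack
      have hnN : n < N := hstack n List.mem_cons_self
      have hnlen : n < s.1.length := by omega
      cases hvb : s.1.getD n false with
      | true =>
        rw [loopB, dif_neg (by rw [hvb]; simp)]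
        simp only [List.foldl_cons]
        rw [show runA nodes g f s n = s by unfold runA; rw [if_pos hvb]]
        exact ihst s f hL hcu huf (fun x hx => hstack x (List.mem_cons_of_mem _ hx))
      | false =>
        have hpos : 0 < s.1.count false := pvCount_pos s.1 n hnlen hvb
        have hu1 : 1 ≤ u := le_trans hpos hcu
        obtain ⟨f0, rfl⟩ : ∃ f0, f = f0 + 1 := ⟨f - 1, by omega⟩
        rw [loopB, dif_pos ⟨hnlen, hvb⟩]
        have hadj : ∀ x ∈ g.getD n [], x < N := by
          rcases pvGetD_mem_or_nil g n with hm | hm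
          · exact hg _ hm
          · rw [hm]; intro x hx; simp at hx
        have hL1 : (pvVisit nodes g n s).1.length = N := by rw [pvVisit_len]; exact hL
        have hc1 : (pvVisit nodes g n s).1.count false ≤ u - 1 := by
          have := pvVisit_count_lt nodes g n s hnlen hvb
          omega
        rw [IHu (u - 1) (by omega) _ _ f0 hL1 hc1 (by omega)
          (by intro x hx
              rcases List.mem_append.mp hx with h | h
              · exact hadj x h
              · exact hstack x (List.mem_cons_of_mem _ h))]
        rw [List.foldl_append]
        have hs2L : ((g.getD n []).foldl (runA nodes g f0) (pvVisit nodes g n s)).1.length = N := by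
          rw [(foldl_runA_inv nodes g f0 _ _).1]
          exact hL1
        have hs2c : ((g.getD n []).foldl (runA nodes g f0) (pvVisit nodes g n s)).1.count false ≤ u - 1 := by
          have := (foldl_runA_inv nodes g f0 (pvVisit nodes g n s) (g.getD n [])).2
          omega
        rw [FIF nodes g N hg (u - 1) _ rest f0 (f0 + 1) hs2L hs2c (by omega) (by omega)
          (fun x hx => hstack x (List.mem_cons_of_mem _ hx))]
        simp only [List.foldl_cons]
        rw [show runA nodes g (f0 + 1) s n = dfsA nodes g (f0 + 1) s n by
            unfold runA; rw [if_neg (by rw [hvb]; simp)],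
          dfsA_succ]

-- the three step functions of the two outer loops, named for the induction
def cstep (a : Int × Int) (tc : Int × Int) : Int × Int :=
  (if tc.2 = 1 then a.1 + 1 else a.1, if tc.1 - tc.2 = 1 then a.2 + 1 else a.2)

def stepA (nodes : List Int) (g : List (List Nat)) (N : Nat)
    (p : List Bool × List (Int × Int)) (i : Nat) : List Bool × List (Int × Int) :=
  if p.1.getD i false then p
  else
    let r := dfsA nodes g N (p.1, 0, 0) i
    (r.1, p.2 ++ [(r.2.1, r.2.2)])

def stepB (nodes : List Int) (g : List (List Nat))
    (p : List Bool × Int × Int) (i : Nat) : List Bool × Int × Int :=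
  if p.1.getD i false then p
  else
    let r := loopB nodes g (p.1, 0, 0) [i]
    (r.1, (if r.2.2 = 1 then p.2.1 + 1 else p.2.1),
      (if r.2.1 - r.2.2 = 1 then p.2.2 + 1 else p.2.2))

theorem TOP (nodes : List Int) (g : List (List Nat)) (N : Nat) (hg : GOK g N) :
    ∀ (is : List Nat) (v : List Bool) (c0 : List (Int × Int)) (a0 a1 : Int),
      v.length = N → (∀ i ∈ is, i < N) → (a0, a1) = c0.foldl cstep (0, 0) →
      is.foldl (stepB nodes g) (v, a0, a1) =
        ((is.foldl (stepA nodes g N) (v, c0)).1,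
         ((is.foldl (stepA nodes g N) (v, c0)).2.foldl cstep (0, 0)).1,
         ((is.foldl (stepA nodes g N) (v, c0)).2.foldl cstep (0, 0)).2) := by
  intro is
  induction is with
  | nil =>
    intro v c0 a0 a1 _ _ ha
    simp only [List.foldl_nil]
    rw [← ha]
  | cons i is' ih =>
    intro v c0 a0 a1 hL his ha
    have hiN : i < N := his i List.mem_cons_self
    simp only [List.foldl_cons]
    cases hvb : v.getD i false with
    | true =>
      have hA : stepA nodes g N (v, c0) i = (v, c0) := by
        unfold stepA; rw [if_pos hvb]
      have hB : stepB nodes g (v, a0, a1) i = (v, a0, a1) := by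
        unfold stepB; rw [if_pos hvb]
      rw [hA, hB]
      exact ih v c0 a0 a1 hL (fun x hx => his x (List.mem_cons_of_mem _ hx)) ha
    | false =>
      have hrun : loopB nodes g (v, 0, 0) [i] = dfsA nodes g N (v, 0, 0) i := by
        rw [ML nodes g N hg (v.count false) (v, 0, 0) [i] N hL
          (le_refl _) (by rw [← hL]; exact List.count_le_length)
          (by intro x hx; rw [List.mem_singleton] at hx; omega)]
        simp only [List.foldl_cons, List.foldl_nil]
        unfold runA
        rw [if_neg (by rw [hvb]; simp)]
      have hA : stepA nodes g N (v, c0) i =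
          ((dfsA nodes g N (v, 0, 0) i).1,
            c0 ++ [((dfsA nodes g N (v, 0, 0) i).2.1, (dfsA nodes g N (v, 0, 0) i).2.2)]) := by
        unfold stepA; rw [if_neg (by rw [hvb]; simp)]
      have hB : stepB nodes g (v, a0, a1) i =
          ((dfsA nodes g N (v, 0, 0) i).1,
            cstep (a0, a1) ((dfsA nodes g N (v, 0, 0) i).2.1, (dfsA nodes g N (v, 0, 0) i).2.2)) := by
        unfold stepB; rw [if_neg (by rw [hvb]; simp), hrun]; rfl
      rw [hA, hB]
      have hrL : (dfsA nodes g N (v, 0, 0) i).1.length = N := by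
        rw [(dfsA_inv nodes g N (v, 0, 0) i).1]
        exact hL
      refine ih (dfsA nodes g N (v, 0, 0) i).1
        (c0 ++ [((dfsA nodes g N (v, 0, 0) i).2.1, (dfsA nodes g N (v, 0, 0) i).2.2)]) _ _ hrL
        (fun x hx => his x (List.mem_cons_of_mem _ hx)) ?_
      rw [List.foldl_append, ← ha]
      rfl

-- ===== VERDICT (by name: the statement is the Claim_ definition above) =====
theorem solution_spec : Claim_equal_solution := by
  intro nodes edges _ _
  unfold Spec_solution
  show solution nodes edges = solution_alt nodes edges
  have h := TOP nodes (pvGraph nodes edges) nodes.length (pvGraph_gok nodes edges)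
    (List.range nodes.length) (List.replicate nodes.length false) [] 0 0
    (by simp) (fun i hi => List.mem_range.mp hi) rfl
  have e1 : solution nodes edges =
      [(((List.range nodes.length).foldl (stepA nodes (pvGraph nodes edges) nodes.length)
        (List.replicate nodes.length false, [])).2.foldl cstep (0, 0)).1,
       (((List.range nodes.length).foldl (stepA nodes (pvGraph nodes edges) nodes.length)
        (List.replicate nodes.length false, [])).2.foldl cstep (0, 0)).2] := rfl
  have e2 : solution_alt nodes edges =
      [((List.range nodes.length).foldl (stepB nodes (pvGraph nodes edges))
        (List.replicate nodes.length false, 0, 0)).2.1,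
       ((List.range nodes.length).foldl (stepB nodes (pvGraph nodes edges))
        (List.replicate nodes.length false, 0, 0)).2.2] := rfl
  rw [e1, e2, h]
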